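-- pv_equiv track=rewrite | github.com/aihaysteve/local-rag | src/ragling/tools/helpers.py | _detect_subsystems_from_paths
-- ===== SOURCE A (Python) =====
-- def _detect_subsystems_from_paths(file_paths: list[str]) -> list[str]:
--     """Detect subsystem names from file paths by finding SPEC.md directories.
--
--     Walks each file path upward to find the containing subsystem directory
--     (identified by having a SPEC.md in the repo's subsystem layout).
--
--     Uses the path structure convention: ``src/ragling/<subsystem>/`` maps
--     to subsystem name ``<subsystem>``, and ``src/ragling/`` itself maps to
--     ``Core`` (the root subsystem).
--     """
--     # Known subsystem directories from the project layout
--     _SUBSYSTEM_DIRS = {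
--         "src/ragling/auth": "Auth",
--         "src/ragling/document": "Document",
--         "src/ragling/indexers": "Indexers",
--         "src/ragling/parsers": "Parsers",
--         "src/ragling/search": "Search",
--         "src/ragling/watchers": "Watchers",
--     }
--     _CORE_PREFIX = "src/ragling/"
--
--     subsystems: list[str] = []
--     seen: set[str] = set()
--
--     for fp in file_paths:
--         # Normalize path
--         fp = fp.lstrip("./")
--         matched = False
--         for prefix, name in _SUBSYSTEM_DIRS.items():
--             if fp.startswith(prefix + "/") or fp == prefix:
--                 if name not in seen:
--                     subsystems.append(name)
--                     seen.add(name)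
--                 matched = True
--                 break
--         if not matched and fp.startswith(_CORE_PREFIX) and "Core" not in seen:
--             subsystems.append("Core")
--             seen.add("Core")
--
--     return subsystems
-- ===== SOURCE B (Python) =====
-- def _detect_subsystems_from_paths(file_paths: list[str]) -> list[str]:
--     """Detect subsystem names from file paths (first-seen order).
--
--     Structural parse: strip the 'src/ragling/' prefix once, cut the next
--     path component, and map it through one dict lookup (default 'Core'),
--     instead of scanning six prefixes per path.
--     """
--     names = {
--         "auth": "Auth",
--         "document": "Document",
--         "indexers": "Indexers",
--         "parsers": "Parsers",
--         "search": "Search",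
--         "watchers": "Watchers",
--     }
--     subsystems: list[str] = []
--     seen: set[str] = set()
--     for fp in file_paths:
--         fp = fp.lstrip("./")
--         if not fp.startswith("src/ragling/"):
--             continue
--         rest = fp[len("src/ragling/"):]
--         i = rest.find("/")
--         first = rest if i == -1 else rest[:i]
--         name = names.get(first, "Core")
--         if name not in seen:
--             subsystems.append(name)
--             seen.add(name)
--     return subsystems
-- ===== Notes on version B (the rewrite author's own statement) =====
-- stated objective: simpler
-- what changed: Replaces A's per-path scan over six 'src/ragling/<name>' prefixes (prefix-or-exact string test each) by one structural parse: test the single 'src/ragling/' prefix, cut the next path component, and map it through one dict lookup defaulting to 'Core'.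
import Mathlib
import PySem

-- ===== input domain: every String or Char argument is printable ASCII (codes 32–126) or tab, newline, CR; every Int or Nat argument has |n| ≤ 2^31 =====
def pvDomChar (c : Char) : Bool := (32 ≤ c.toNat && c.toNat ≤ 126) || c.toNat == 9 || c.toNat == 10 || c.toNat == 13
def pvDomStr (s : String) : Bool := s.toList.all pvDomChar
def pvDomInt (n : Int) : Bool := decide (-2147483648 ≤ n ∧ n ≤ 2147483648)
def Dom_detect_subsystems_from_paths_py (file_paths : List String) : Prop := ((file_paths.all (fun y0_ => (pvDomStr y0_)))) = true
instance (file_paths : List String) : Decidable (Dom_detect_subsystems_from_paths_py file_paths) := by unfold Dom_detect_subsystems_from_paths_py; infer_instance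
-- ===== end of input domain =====

-- B replaces A's six-way prefix scan per path by one structural parse (strip the
-- 'src/ragling/' prefix, cut the next path component) and a single dict lookup (simpler).

-- ===== PORT A =====
-- fp.lstrip("./"): drop leading chars that are '.' or '/' (exact hand port of str.lstrip
-- with a char-set argument, which PySem has no primitive for); shared line of both Pythons
def pvLstripDotSlash (cs : List Char) : List Char :=
  cs.dropWhile (fun c => c == '.' || c == '/')

def pvSubsysDirs : List (List Char × String) :=
  [("src/ragling/auth".toList, "Auth"),
   ("src/ragling/document".toList, "Document"),
   ("src/ragling/indexers".toList, "Indexers"),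
   ("src/ragling/parsers".toList, "Parsers"),
   ("src/ragling/search".toList, "Search"),
   ("src/ragling/watchers".toList, "Watchers")]

-- the inner 'for prefix, name in _SUBSYSTEM_DIRS.items(): … break' loop of A
def pvScanA : List (List Char × String) → List Char → List String → PySem.Set String →
    List String × PySem.Set String × Bool
  | [], _, subs, seen => (subs, seen, false)
  | (pre, name) :: rest, fp, subs, seen =>
    if PySem.Chars.startswith fp (pre ++ ['/']) || fp == pre then
      if seen.contains name then (subs, seen, true) else (subs ++ [name], seen.add name, true)
    else pvScanA rest fp subs seen

-- body of A's outer loop: inner scan, then the 'not matched and fp.startswith(core)' check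
def pvStepA (f : List Char) (subs : List String) (seen : PySem.Set String) :
    List String × PySem.Set String :=
  match pvScanA pvSubsysDirs f subs seen with
  | (subs', seen', matched) =>
    if !matched && PySem.Chars.startswith f "src/ragling/".toList && !(seen'.contains "Core") then
      (subs' ++ ["Core"], seen'.add "Core")
    else (subs', seen')

def pvLoopA : List String → List String → PySem.Set String → List String
  | [], subs, _ => subs
  | fp :: rest, subs, seen =>
    let st := pvStepA (pvLstripDotSlash fp.toList) subs seen
    pvLoopA rest st.1 st.2

def detect_subsystems_from_paths_py (file_paths : List String) : List String :=
  pvLoopA file_paths [] PySem.Set.empty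

-- ===== PORT B =====
def pvNames : PySem.Dict (List Char) String :=
  PySem.Dict.ofList
    [("auth".toList, "Auth"), ("document".toList, "Document"), ("indexers".toList, "Indexers"),
     ("parsers".toList, "Parsers"), ("search".toList, "Search"), ("watchers".toList, "Watchers")]

-- body of B's loop: one prefix test, cut next component, one dict lookup
def pvStepB (f : List Char) (subs : List String) (seen : PySem.Set String) :
    List String × PySem.Set String :=
  if PySem.Chars.startswith f "src/ragling/".toList then
    let rest := PySem.List.slice f (some 12) none       -- fp[len("src/ragling/"):], len = 12
    let i := PySem.Chars.find rest ['/']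
    let first := if i == -1 then rest else PySem.List.slice rest none (some i)
    let name := pvNames.getD first "Core"
    if seen.contains name then (subs, seen) else (subs ++ [name], seen.add name)
  else (subs, seen)

def pvLoopB : List String → List String → PySem.Set String → List String
  | [], subs, _ => subs
  | fp :: rest, subs, seen =>
    let st := pvStepB (pvLstripDotSlash fp.toList) subs seen
    pvLoopB rest st.1 st.2

def detect_subsystems_from_paths_py_alt (file_paths : List String) : List String :=
  pvLoopB file_paths [] PySem.Set.empty

-- ===== PRECONDITION & SPEC =====
def Spec_detect_subsystems_from_paths_py (file_paths : List String) (out : List String) : Prop := out = detect_subsystems_from_paths_py_alt file_paths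
instance (file_paths : List String) (out : List String) : Decidable (Spec_detect_subsystems_from_paths_py file_paths out) := by unfold Spec_detect_subsystems_from_paths_py; infer_instance

-- ===== CLAIM (what is proved, stated in full; the proofs are below) =====
def Claim_equal_detect_subsystems_from_paths_py : Prop := ∀ (file_paths : List String), Dom_detect_subsystems_from_paths_py file_paths → Spec_detect_subsystems_from_paths_py file_paths (detect_subsystems_from_paths_py file_paths)

-- ===== LEMMAS AND PROOFS =====

lemma pv_singleton_prefix (x : Char) (l : List Char) : [x] <+: l ↔ ∃ t, l = x :: t := by
  constructor
  · rintro ⟨t, rfl⟩; exact ⟨t, rfl⟩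
  · rintro ⟨t, rfl⟩; exact ⟨t, rfl⟩

lemma pv_take_eq_takeWhile (p : Char → Bool) :
    ∀ (l : List Char) (k : Nat),
      (∀ j, j < k → ∃ a, l[j]? = some a ∧ p a = true) →
      (∃ a, l[k]? = some a ∧ p a = false) →
      l.take k = l.takeWhile p
  | [], k, _, h => by simp at h
  | a :: t, 0, _, h => by
    simp at h
    simp [h]
  | a :: t, k + 1, h1, h2 => by
    have ha : p a = true := by
      obtain ⟨b, hb, hpb⟩ := h1 0 (Nat.succ_pos _)
      simp at hb; subst hb; exact hpb
    have ih := pv_take_eq_takeWhile p t k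
      (fun j hj => by simpa using h1 (j + 1) (by omega))
      (by simpa using h2)
    simp [ha, ih]

-- B's 'first component' computation is takeWhile (≠ '/')
lemma pv_first_eq_takeWhile (r : List Char) :
    (if PySem.Chars.find r ['/'] == -1 then r
     else PySem.List.slice r none (some (PySem.Chars.find r ['/']))) =
      r.takeWhile (fun c => c != '/') := by
  by_cases h : PySem.Chars.find r ['/'] = -1
  · rw [if_pos (by simpa using h)]
    have hns : ¬ ['/'] <:+: r := (PySem.Chars.find_eq_neg_one_iff r ['/']).mp h
    have : ∀ c ∈ r, (c != '/') = true := by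
      intro c hc
      rcases eq_or_ne c '/' with rfl | hne
      · exact absurd ((List.singleton_infix_iff _ _).mpr hc) hns
      · simpa using hne
    exact (List.takeWhile_eq_self_iff.mpr this).symm
  · rw [if_neg (by simpa using h)]
    have hge : 0 ≤ PySem.Chars.find r ['/'] := by
      rcases (PySem.Chars.neg_one_le_find r ['/']).lt_or_eq with hlt | heq
      · omega
      · exact absurd heq.symm h
    obtain ⟨hpre, hmin⟩ := PySem.Chars.find_spec hge
    rw [PySem.List.slice_to r hge]
    apply pv_take_eq_takeWhile
    · intro j hj
      have hjlt : j < (PySem.Chars.find r ['/']).toNat := hj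
      have hnp := hmin j hjlt
      have hjlen : j < r.length := by
        have := PySem.Chars.find_le_length r ['/']
        omega
      refine ⟨r[j], by simp [hjlen], ?_⟩
      rcases eq_or_ne r[j] '/' with he | hne
      · exfalso
        apply hnp
        rw [pv_singleton_prefix]
        refine ⟨r.drop (j + 1), ?_⟩
        rw [← he]
        exact (List.drop_eq_getElem_cons hjlen)
      · simpa using hne
    · obtain ⟨t, ht⟩ := (pv_singleton_prefix _ _).mp hpre
      have hlen : (PySem.Chars.find r ['/']).toNat < r.length := by
        by_contra hc
        rw [List.drop_eq_nil_of_le (by omega)] at ht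
        simp at ht
      refine ⟨r[(PySem.Chars.find r ['/']).toNat], by simp [hlen], ?_⟩
      have : r[(PySem.Chars.find r ['/']).toNat] = '/' := by
        have := List.drop_eq_getElem_cons hlen
        rw [this] at ht
        exact (List.cons.injEq _ _ _ _).mp ht |>.1
      simp [this]

-- A's per-prefix condition, under 'src/ragling/' + w, is 'first component = w'
lemma pv_key (w r : List Char) (hw : ∀ c ∈ w, (c != '/') = true) :
    ((w ++ ['/']) <+: r ∨ r = w) ↔ r.takeWhile (fun c => c != '/') = w := by
  constructor
  · rintro (⟨t, rfl⟩ | rfl)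
    · rw [List.append_assoc, List.takeWhile_append,
        if_pos (by rw [List.takeWhile_eq_self_iff.mpr hw])]
      simp
    · exact List.takeWhile_eq_self_iff.mpr hw
  · intro h
    rcases hd : r.dropWhile (fun c => c != '/') with _ | ⟨b, t⟩
    · right
      have := List.takeWhile_append_dropWhile (p := fun c => c != '/') (l := r)
      rw [h, hd] at this
      simpa using this.symm
    · left
      have hb : b = '/' := by
        have h' := List.head_dropWhile_not (fun c => c != '/') (l := r) (by simp [hd])
        simp only [hd, List.head_cons] at h'
        simpa using h'
      have := List.takeWhile_append_dropWhile (p := fun c => c != '/') (l := r)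
      rw [h, hd, hb] at this
      exact ⟨t, by rw [List.append_assoc]; simpa using this⟩

lemma pv_cond_iff (w r : List Char) (hw : ∀ c ∈ w, (c != '/') = true) :
    (PySem.Chars.startswith ("src/ragling/".toList ++ r) (("src/ragling/".toList ++ w) ++ ['/']) ||
      (("src/ragling/".toList ++ r) == ("src/ragling/".toList ++ w))) = true ↔
      r.takeWhile (fun c => c != '/') = w := by
  rw [← pv_key w r hw]
  simp only [Bool.or_eq_true, PySem.Chars.startswith_iff, beq_iff_eq, List.append_assoc,
    List.prefix_append_right_inj, List.append_right_inj]

lemma pv_cond_iff' (pre w r : List Char) (hsplit : pre = "src/ragling/".toList ++ w)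
    (hw : ∀ c ∈ w, (c != '/') = true) :
    (PySem.Chars.startswith ("src/ragling/".toList ++ r) (pre ++ ['/']) ||
      (("src/ragling/".toList ++ r) == pre)) = true ↔
      r.takeWhile (fun c => c != '/') = w := by
  subst hsplit
  exact pv_cond_iff w r hw

lemma pv_no_match (f pre : List Char) (hpre : "src/ragling/".toList <+: pre)
    (hf : ¬ "src/ragling/".toList <+: f) :
    (PySem.Chars.startswith f (pre ++ ['/']) || f == pre) = false := by
  rw [Bool.or_eq_false_iff]
  constructor
  · rw [← Bool.not_eq_true, PySem.Chars.startswith_iff]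
    intro h
    exact hf (hpre.trans ((List.prefix_append pre ['/']).trans h))
  · rw [beq_eq_false_iff_ne]
    rintro rfl
    exact hf hpre
  
set_option maxRecDepth 10000 in
lemma pv_step_eq (f : List Char) (subs : List String) (seen : PySem.Set String) :
    pvStepA f subs seen = pvStepB f subs seen := by
  by_cases hp : PySem.Chars.startswith f "src/ragling/".toList = true
  case neg =>
    have hf : ¬ "src/ragling/".toList <+: f := by
      rw [← PySem.Chars.startswith_iff]; exact hp
    have h1 := pv_no_match f "src/ragling/auth".toList (by decide) hf
    have h2 := pv_no_match f "src/ragling/document".toList (by decide) hf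
    have h3 := pv_no_match f "src/ragling/indexers".toList (by decide) hf
    have h4 := pv_no_match f "src/ragling/parsers".toList (by decide) hf
    have h5 := pv_no_match f "src/ragling/search".toList (by decide) hf
    have h6 := pv_no_match f "src/ragling/watchers".toList (by decide) hf
    have hps : PySem.Chars.startswith f "src/ragling/".toList = false :=
      Bool.eq_false_iff.mpr hp
    simp only [pvStepA, pvStepB, pvScanA, pvSubsysDirs]
    rw [h1, h2, h3, h4, h5, h6, hps]
    simp
  case pos =>
    obtain ⟨r, rfl⟩ := (PySem.Chars.startswith_iff f _).mp hp
    have hdrop : PySem.List.slice ("src/ragling/".toList ++ r) (some 12) none = r := by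
      rw [PySem.List.slice_from _ (by norm_num)]
      have h12 : (12 : Int).toNat = ("src/ragling/".toList).length := by decide
      rw [h12, List.drop_left]
    have c1 := pv_cond_iff' "src/ragling/auth".toList "auth".toList r (by decide) (by simp)
    have c2 := pv_cond_iff' "src/ragling/document".toList "document".toList r (by decide) (by simp)
    have c3 := pv_cond_iff' "src/ragling/indexers".toList "indexers".toList r (by decide) (by simp)
    have c4 := pv_cond_iff' "src/ragling/parsers".toList "parsers".toList r (by decide) (by simp)
    have c5 := pv_cond_iff' "src/ragling/search".toList "search".toList r (by decide) (by simp)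
    have c6 := pv_cond_iff' "src/ragling/watchers".toList "watchers".toList r (by decide) (by simp)
    have hB : pvStepB ("src/ragling/".toList ++ r) subs seen =
        (if seen.contains (pvNames.getD (r.takeWhile (fun c => c != '/')) "Core") then
          (subs, seen)
        else
          (subs ++ [pvNames.getD (r.takeWhile (fun c => c != '/')) "Core"],
            seen.add (pvNames.getD (r.takeWhile (fun c => c != '/')) "Core"))) := by
      simp only [pvStepB, hp, if_true, hdrop, pv_first_eq_takeWhile]
    rw [hB]
    simp only [pvStepA, pvScanA, pvSubsysDirs]
    by_cases h1 : r.takeWhile (fun c => c != '/') = "auth".toList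
    · rw [c1.mpr h1, h1, show pvNames.getD "auth".toList "Core" = "Auth" from by decide]
      by_cases hs : "Auth" ∈ seen <;> simp [hs]
    rw [Bool.eq_false_iff.mpr (fun hh => h1 (c1.mp hh))]
    by_cases h2 : r.takeWhile (fun c => c != '/') = "document".toList
    · rw [c2.mpr h2, h2, show pvNames.getD "document".toList "Core" = "Document" from by decide]
      by_cases hs : "Document" ∈ seen <;> simp [hs]
    rw [Bool.eq_false_iff.mpr (fun hh => h2 (c2.mp hh))]
    by_cases h3 : r.takeWhile (fun c => c != '/') = "indexers".toList
    · rw [c3.mpr h3, h3, show pvNames.getD "indexers".toList "Core" = "Indexers" from by decide]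
      by_cases hs : "Indexers" ∈ seen <;> simp [hs]
    rw [Bool.eq_false_iff.mpr (fun hh => h3 (c3.mp hh))]
    by_cases h4 : r.takeWhile (fun c => c != '/') = "parsers".toList
    · rw [c4.mpr h4, h4, show pvNames.getD "parsers".toList "Core" = "Parsers" from by decide]
      by_cases hs : "Parsers" ∈ seen <;> simp [hs]
    rw [Bool.eq_false_iff.mpr (fun hh => h4 (c4.mp hh))]
    by_cases h5 : r.takeWhile (fun c => c != '/') = "search".toList
    · rw [c5.mpr h5, h5, show pvNames.getD "search".toList "Core" = "Search" from by decide]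
      by_cases hs : "Search" ∈ seen <;> simp [hs]
    rw [Bool.eq_false_iff.mpr (fun hh => h5 (c5.mp hh))]
    by_cases h6 : r.takeWhile (fun c => c != '/') = "watchers".toList
    · rw [c6.mpr h6, h6, show pvNames.getD "watchers".toList "Core" = "Watchers" from by decide]
      by_cases hs : "Watchers" ∈ seen <;> simp [hs]
    rw [Bool.eq_false_iff.mpr (fun hh => h6 (c6.mp hh))]
    -- no subsystem key matches: both sides produce "Core"
    have n1 : ("auth".toList == r.takeWhile (fun c => c != '/')) = false := by
      rw [beq_eq_false_iff_ne]; exact fun hh => h1 hh.symm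
    have n2 : ("document".toList == r.takeWhile (fun c => c != '/')) = false := by
      rw [beq_eq_false_iff_ne]; exact fun hh => h2 hh.symm
    have n3 : ("indexers".toList == r.takeWhile (fun c => c != '/')) = false := by
      rw [beq_eq_false_iff_ne]; exact fun hh => h3 hh.symm
    have n4 : ("parsers".toList == r.takeWhile (fun c => c != '/')) = false := by
      rw [beq_eq_false_iff_ne]; exact fun hh => h4 hh.symm
    have n5 : ("search".toList == r.takeWhile (fun c => c != '/')) = false := by
      rw [beq_eq_false_iff_ne]; exact fun hh => h5 hh.symm
    have n6 : ("watchers".toList == r.takeWhile (fun c => c != '/')) = false := by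
      rw [beq_eq_false_iff_ne]; exact fun hh => h6 hh.symm
    have m1 : (['a','u','t','h'] == List.takeWhile (fun c => c != '/') r) = false := n1
    have m2 : (['d','o','c','u','m','e','n','t'] == List.takeWhile (fun c => c != '/') r) = false := n2
    have m3 : (['i','n','d','e','x','e','r','s'] == List.takeWhile (fun c => c != '/') r) = false := n3
    have m4 : (['p','a','r','s','e','r','s'] == List.takeWhile (fun c => c != '/') r) = false := n4
    have m5 : (['s','e','a','r','c','h'] == List.takeWhile (fun c => c != '/') r) = false := n5
    have m6 : (['w','a','t','c','h','e','r','s'] == List.takeWhile (fun c => c != '/') r) = false := n6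
    have hmiss : pvNames.getD (r.takeWhile (fun c => c != '/')) "Core" = "Core" := by
      simp only [pvNames, PySem.Dict.getD, PySem.Dict.get?]
      rw [show (PySem.Dict.ofList
        [("auth".toList, "Auth"), ("document".toList, "Document"),
         ("indexers".toList, "Indexers"), ("parsers".toList, "Parsers"),
         ("search".toList, "Search"), ("watchers".toList, "Watchers")]).items =
        [("auth".toList, "Auth"), ("document".toList, "Document"),
         ("indexers".toList, "Indexers"), ("parsers".toList, "Parsers"),
         ("search".toList, "Search"), ("watchers".toList, "Watchers")] from by decide]
      simp [List.find?, m1, m2, m3, m4, m5, m6]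
    rw [hmiss]
    have hp' : PySem.Chars.startswith
        ('s' :: 'r' :: 'c' :: '/' :: 'r' :: 'a' :: 'g' :: 'l' :: 'i' :: 'n' :: 'g' :: '/' :: r)
        ['s', 'r', 'c', '/', 'r', 'a', 'g', 'l', 'i', 'n', 'g', '/'] = true := hp
    by_cases hC : "Core" ∈ seen <;> simp [hp', hC]

lemma pv_loop_eq : ∀ (l : List String) (subs : List String) (seen : PySem.Set String),
    pvLoopA l subs seen = pvLoopB l subs seen
  | [], _, _ => rfl
  | fp :: rest, subs, seen => by
    rw [pvLoopA, pvLoopB, pv_step_eq]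
    exact pv_loop_eq rest _ _

-- ===== VERDICT (by name: the statement is the Claim_ definition above) =====
theorem detect_subsystems_from_paths_py_spec : Claim_equal_detect_subsystems_from_paths_py := by
  intro file_paths _
  unfold Spec_detect_subsystems_from_paths_py detect_subsystems_from_paths_py
    detect_subsystems_from_paths_py_alt
  exact pv_loop_eq file_paths [] PySem.Set.empty
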